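-- pv_equiv track=rewrite | github.com/apadrta/AoC | advent_of_code_2024/day12/solution.py | data2objects
-- ===== SOURCE A (Python) =====
-- def split_objects(letters):
--     """
--     Split object
--     """
--     objs = []
--     obj = [letters.pop(0)]
--     while letters:
--         target = -1
--         for idx, letter in enumerate(letters):
--             for item in obj:
--                 if abs(item[0] - letter[0]) == 1 and item[1] == letter[1]:
--                     target = idx
--                     break
--                 if abs(item[1] - letter[1]) == 1 and item[0] == letter[0]:
--                     target = idx
--                     break
--             if target > -1:
--                 break
--         if target > -1:
--             obj.append(letters.pop(target))
--         else:
--             objs.append(obj)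
--             obj = [letters.pop(0)]
--     if obj:
--         objs.append(obj)
--     return objs
--
-- def data2objects(data):
--     """
--     Extract objects from data
--     """
--     letters = {}
--     for idx, line in enumerate(data):
--         for jdx, char in enumerate(line):
--             if char not in letters:
--                 letters[char] = []
--             letters[char].append((idx, jdx))
--     objs = []
--     for value in letters.values():
--         objs += split_objects(value)
--     return objs
-- ===== SOURCE B (Python) =====
-- import heapq
--
--
-- def data2objects(data):
--     """
--     Extract objects from data
--     """
--     groups = {}
--     for i, line in enumerate(data):
--         for j, ch in enumerate(line):
--             groups.setdefault(ch, []).append((i, j))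
--     objs = []
--     for cells in groups.values():
--         index = {c: k for k, c in enumerate(cells)}
--         n = len(cells)
--         done = set()
--         start = 0
--         while start < n:
--             obj = []
--             heap = [start]
--             inheap = {start}
--             while heap:
--                 k = heapq.heappop(heap)
--                 done.add(k)
--                 i, j = cells[k]
--                 obj.append((i, j))
--                 for c in ((i - 1, j), (i + 1, j), (i, j - 1), (i, j + 1)):
--                     t = index.get(c)
--                     if t is not None and t not in done and t not in inheap:
--                         heapq.heappush(heap, t)
--                         inheap.add(t)
--             objs.append(obj)
--             while start < n and start in done:
--                 start += 1
--     return objs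
-- ===== Notes on version B (the rewrite author's own statement) =====
-- stated objective: faster
-- what changed: A grows each component by repeatedly rescanning the whole remaining-cell list against the whole grown component; B never scans the remaining list: it builds a coordinate->index dict per character group and runs a best-first search (min-heap of candidate indices discovered by O(1) neighbour lookups), which reproduces A's greedy smallest-index growth order.
import Mathlib
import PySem

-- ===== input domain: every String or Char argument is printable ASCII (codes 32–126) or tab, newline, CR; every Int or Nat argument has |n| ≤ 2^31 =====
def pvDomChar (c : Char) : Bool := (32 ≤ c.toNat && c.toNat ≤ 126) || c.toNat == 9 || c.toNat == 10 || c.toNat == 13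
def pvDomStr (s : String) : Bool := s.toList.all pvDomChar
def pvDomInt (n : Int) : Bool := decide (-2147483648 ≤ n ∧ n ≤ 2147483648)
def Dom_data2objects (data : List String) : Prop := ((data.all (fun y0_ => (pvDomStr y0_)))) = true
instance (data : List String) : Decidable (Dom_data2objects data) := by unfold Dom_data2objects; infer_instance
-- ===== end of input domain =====

-- B replaces A's repeated scans of the remaining-cell list by a per-group coordinate->index
-- dict and a best-first search over a min-heap of neighbour indices; same return value.

-- ===== PORT A =====

-- the two adjacency tests of A's inner 'for item in obj' loop (either one sets target)
def adjA (item letter : Int × Int) : Bool :=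
  ((item.1 - letter.1).natAbs == 1 && item.2 == letter.2) ||
  ((item.2 - letter.2).natAbs == 1 && item.1 == letter.1)

-- A's 'while letters' loop of split_objects; the nested for/break scan computing 'target'
-- is the first index whose letter is adjacent to some item of obj (findIdx?).
-- fuel only makes the recursion structural; it starts at letters.length, which never runs out.
def splitLoopA (fuel : Nat) (letters obj : List (Int × Int)) (objs : List (List (Int × Int))) :
    List (List (Int × Int)) :=
  match letters with
  | [] => if obj = [] then objs else objs ++ [obj]   -- 'if obj: objs.append(obj)'
  | l0 :: rest =>
    match fuel with
    | 0 => objs   -- unreachable: each iteration pops one element of letters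
    | fuel + 1 =>
      match (l0 :: rest).findIdx? (fun letter => obj.any (fun item => adjA item letter)) with
      | some idx =>
          splitLoopA fuel ((l0 :: rest).eraseIdx idx) (obj ++ [(l0 :: rest).getD idx l0]) objs
      | none => splitLoopA fuel rest [l0] (objs ++ [obj])

-- split_objects(letters); [] is unreachable from data2objects (dict values are nonempty)
def splitObjectsA (letters : List (Int × Int)) : List (List (Int × Int)) :=
  match letters with
  | [] => []
  | l0 :: rest => splitLoopA rest.length rest [l0] []

def data2objects (data : List String) : List (List (Int × Int)) :=
  let letters : PySem.Dict Char (List (Int × Int)) :=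
    (PySem.List.enumerate data).foldl (fun d p =>
      (PySem.List.enumerate p.2.toList).foldl (fun d q =>
        -- 'if char not in letters: letters[char] = []' then 'letters[char].append((idx, jdx))'
        let d1 := if d.contains q.2 then d else d.insert q.2 ([] : List (Int × Int))
        d1.insert q.2 (d1.getD q.2 [] ++ [(p.1, q.1)])) d)
      PySem.Dict.empty
  letters.values.foldl (fun objs v => objs ++ splitObjectsA v) []

-- ===== PORT B =====

-- the four grid neighbours of a cell, as in Source B's tuple
def nbrsB (c : Int × Int) : List (Int × Int) :=
  [(c.1 - 1, c.2), (c.1 + 1, c.2), (c.1, c.2 - 1), (c.1, c.2 + 1)]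

-- heapq is modelled by its contract: the heap is kept as an ascending list,
-- heappush = ordered insert, heappop = head (exact for the min-pop behaviour Source B uses)
def heapPush (h : List Int) (k : Int) : List Int :=
  match h with
  | [] => [k]
  | x :: xs => if k ≤ x then k :: x :: xs else x :: heapPush xs k

-- Source B's 'for c in nbrs: t = index.get(c); if t is not None and t not in done and t not in inheap: push'
def pushNbrs (index : PySem.Dict (Int × Int) Int) (done : PySem.Set Int)
    (c : Int × Int) (heap : List Int) (inheap : PySem.Set Int) :
    List Int × PySem.Set Int :=
  (nbrsB c).foldl (fun st nb =>
    match index.get? nb with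
    | some t =>
        if PySem.Set.contains done t || PySem.Set.contains st.2 t then st
        else (heapPush st.1 t, PySem.Set.add st.2 t)
    | none => st) (heap, inheap)

-- Source B's inner 'while heap' loop; fuel = len(cells) only makes the recursion structural
-- (each iteration marks a fresh index done, so it never runs out)
def bfsLoopB (cells : List (Int × Int)) (index : PySem.Dict (Int × Int) Int) (fuel : Nat)
    (heap : List Int) (inheap done : PySem.Set Int) (obj : List (Int × Int)) :
    List (Int × Int) × PySem.Set Int :=
  match fuel, heap with
  | _, [] => (obj, done)
  | 0, _ :: _ => (obj, done)   -- unreachable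
  | fuel + 1, k :: hs =>
    let done' := PySem.Set.add done k
    let c := PySem.List.pyGetD cells k (0, 0)   -- cells[k]; k is always a valid index
    let st := pushNbrs index done' c hs inheap
    bfsLoopB cells index fuel st.1 st.2 done' (obj ++ [c])

-- Source B's 'while start < n and start in done: start += 1' (fuel = n, never runs out)
def advanceB (n : Int) (done : PySem.Set Int) (fuel : Nat) (start : Int) : Int :=
  match fuel with
  | 0 => start
  | fuel + 1 =>
    if start < n && PySem.Set.contains done start then advanceB n done fuel (start + 1)
    else start

-- Source B's outer 'while start < n' loop (fuel = n: start strictly increases each round)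
def outerLoopB (cells : List (Int × Int)) (index : PySem.Dict (Int × Int) Int) (fuel : Nat)
    (start : Int) (done : PySem.Set Int) (objs : List (List (Int × Int))) :
    List (List (Int × Int)) :=
  match fuel with
  | 0 => objs
  | fuel + 1 =>
    if start < (cells.length : Int) then
      let r := bfsLoopB cells index cells.length [start] (PySem.Set.ofList [start]) done []
      outerLoopB cells index fuel (advanceB (cells.length : Int) r.2 cells.length start)
        r.2 (objs ++ [r.1])
    else objs

-- 'index = {c: k for k, c in enumerate(cells)}'
def indexOfCells (cells : List (Int × Int)) : PySem.Dict (Int × Int) Int :=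
  (PySem.List.enumerate cells).foldl (fun d p => d.insert p.2 p.1) PySem.Dict.empty

def data2objects_alt (data : List String) : List (List (Int × Int)) :=
  let groups : PySem.Dict Char (List (Int × Int)) :=
    (PySem.List.enumerate data).foldl (fun d p =>
      (PySem.List.enumerate p.2.toList).foldl (fun d q =>
        -- 'groups.setdefault(ch, []).append((i, j))'
        let d1 := d.setdefault q.2 ([] : List (Int × Int))
        d1.insert q.2 (d1.getD q.2 [] ++ [(p.1, q.1)])) d)
      PySem.Dict.empty
  groups.values.foldl (fun objs cells =>
    outerLoopB cells (indexOfCells cells) cells.length 0 PySem.Set.empty objs) []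

-- ===== PRECONDITION & SPEC =====
def Spec_data2objects (data : List String) (out : List (List (Int × Int))) : Prop := out = data2objects_alt data
instance (data : List String) (out : List (List (Int × Int))) : Decidable (Spec_data2objects data out) := by unfold Spec_data2objects; infer_instance

-- ===== CLAIM (what is proved, stated in full; the proofs are below) =====
def Claim_equal_data2objects : Prop := ∀ (data : List String), Dom_data2objects data → Spec_data2objects data (data2objects data)

-- ===== LEMMAS AND PROOFS =====

-- A's candidate test: is c adjacent to some member of obj
def adjO (obj : List (Int × Int)) (c : Int × Int) : Bool := obj.any (fun item => adjA item c)

-- the enumerated cells of a group that are not yet done (A's remaining 'letters', with indices)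
def remP (v : List (Int × Int)) (done : PySem.Set Int) : List (Int × (Int × Int)) :=
  (PySem.List.enumerate v).filter (fun p => !(PySem.Set.contains done p.1))

-- A's computation from a reseed point
def stepA (letters : List (Int × Int)) (objs : List (List (Int × Int))) :
    List (List (Int × Int)) :=
  match letters with
  | [] => objs
  | l0 :: rest => splitLoopA rest.length rest [l0] objs

lemma scontains_false {s : PySem.Set Int} {x : Int} :
    PySem.Set.contains s x = false ↔ x ∉ s := by
  constructor
  · intro h hm
    rw [← PySem.Set.contains_iff s x] at hm
    rw [h] at hm
    cases hm
  · intro h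
    cases hc : PySem.Set.contains s x
    · rfl
    · exact absurd ((PySem.Set.contains_iff _ _).mp hc) h

lemma scontains_add_false {s : PySem.Set Int} {k t : Int} :
    PySem.Set.contains (PySem.Set.add s k) t = false ↔
      (PySem.Set.contains s t = false ∧ t ≠ k) := by
  rw [scontains_false, scontains_false, PySem.Set.mem_add]
  tauto

-- a key-sorted pair list has at most one pair per key
lemma keys_unique {ps : List (Int × (Int × Int))} (h : ps.Pairwise (·.1 < ·.1))
    {p q : Int × (Int × Int)} (hp : p ∈ ps) (hq : q ∈ ps) (he : p.1 = q.1) : p = q := by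
  induction ps with
  | nil => cases hp
  | cons r rest ih =>
    rw [List.pairwise_cons] at h
    rcases List.mem_cons.mp hp with rfl | hp' <;> rcases List.mem_cons.mp hq with rfl | hq'
    · rfl
    · exact absurd he (by have := h.1 q hq'; omega)
    · exact absurd he (by have := h.1 p hp'; omega)
    · exact ih h.2 hp' hq'

lemma mem_nbrs_iff (x c : Int × Int) : (c ∈ nbrsB x) ↔ adjA x c = true := by
  obtain ⟨a, b⟩ := x; obtain ⟨u, v⟩ := c
  simp [nbrsB, adjA, Prod.ext_iff, Int.natAbs_eq_iff]
  omega

lemma findIdx?_lt {α : Type} {p : α → Bool} {l : List α} {i : Nat}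
    (h : l.findIdx? p = some i) : i < l.length := by
  rw [List.findIdx?_eq_some_iff_getElem] at h
  exact h.1

lemma splitLoopA_acc (fuel : Nat) : ∀ (letters obj : List (Int × Int))
    (objs : List (List (Int × Int))),
    splitLoopA fuel letters obj objs = objs ++ splitLoopA fuel letters obj [] := by
  induction fuel with
  | zero =>
    intro letters obj objs
    cases letters with
    | nil => simp only [splitLoopA]; split <;> simp
    | cons l0 rest => simp [splitLoopA]
  | succ fuel ih =>
    intro letters obj objs
    cases letters with
    | nil => simp only [splitLoopA]; split <;> simp
    | cons l0 rest =>
      simp only [splitLoopA]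
      cases hf : (l0 :: rest).findIdx? (fun letter => obj.any (fun item => adjA item letter)) with
      | some idx => exact ih _ _ _
      | none =>
        rw [ih rest [l0] (objs ++ [obj]), ih rest [l0] ([] ++ [obj])]
        simp

lemma splitLoopA_stable : ∀ (fuel : Nat) (letters obj : List (Int × Int))
    (objs : List (List (Int × Int))), letters.length ≤ fuel →
    splitLoopA fuel letters obj objs = splitLoopA letters.length letters obj objs := by
  intro fuel
  induction fuel with
  | zero =>
    intro letters obj objs h
    cases letters with
    | nil => rfl
    | cons l0 rest => simp at h
  | succ fuel ih =>
    intro letters obj objs h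
    cases letters with
    | nil => rfl
    | cons l0 rest =>
      simp only [List.length_cons, splitLoopA]
      cases hf : (l0 :: rest).findIdx? (fun letter => obj.any fun item => adjA item letter) with
      | some idx =>
        dsimp only
        have hlt : idx < (l0 :: rest).length := findIdx?_lt hf
        have hlen : ((l0 :: rest).eraseIdx idx).length = rest.length := by
          rw [List.length_eraseIdx, if_pos hlt]; simp
        rw [ih _ _ _ (by simp at h; omega), hlen]
      | none =>
        dsimp only
        exact ih _ _ _ (by simp at h; omega)

lemma heapPush_mem (k t : Int) : ∀ (h : List Int), t ∈ heapPush h k ↔ t = k ∨ t ∈ h := by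
  intro h
  induction h with
  | nil => simp [heapPush]
  | cons x xs ih =>
    simp only [heapPush]
    split
    · simp
    · simp only [List.mem_cons, ih]
      tauto

lemma heapPush_sorted (k : Int) : ∀ (h : List Int), h.Pairwise (· < ·) → k ∉ h →
    (heapPush h k).Pairwise (· < ·) := by
  intro h
  induction h with
  | nil => intro _ _; simp [heapPush]
  | cons x xs ih =>
    intro hp hk
    rw [List.pairwise_cons] at hp
    simp only [heapPush]
    split
    · rename_i hle
      have hkx : k < x := lt_of_le_of_ne hle (by intro he; exact hk (by simp [he]))
      refine List.pairwise_cons.mpr ⟨?_, List.pairwise_cons.mpr hp⟩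
      intro a ha
      rcases List.mem_cons.mp ha with rfl | ha
      · exact hkx
      · exact lt_trans hkx (hp.1 a ha)
    · rename_i hgt
      refine List.pairwise_cons.mpr ⟨?_, ih hp.2 (fun hm => hk (by simp [hm]))⟩
      intro a ha
      rcases (heapPush_mem k a xs).mp ha with rfl | ha
      · omega
      · exact hp.1 a ha

-- characterization of Source B's neighbour-push loop, for an arbitrary neighbour list
lemma pushFold_spec (index : PySem.Dict (Int × Int) Int) (done : PySem.Set Int) :
    ∀ (ns : List (Int × Int)) (h : List Int) (s : PySem.Set Int),
    h.Pairwise (· < ·) →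
    (∀ t, PySem.Set.contains done t = false → (t ∈ s ↔ t ∈ h)) →
    ((ns.foldl (fun st nb =>
        match index.get? nb with
        | some t =>
            if PySem.Set.contains done t || PySem.Set.contains st.2 t then st
            else (heapPush st.1 t, PySem.Set.add st.2 t)
        | none => st) (h, s)).1.Pairwise (· < ·)
    ∧ (∀ t, PySem.Set.contains done t = false →
        (t ∈ (ns.foldl (fun st nb =>
          match index.get? nb with
          | some t =>
              if PySem.Set.contains done t || PySem.Set.contains st.2 t then st
              else (heapPush st.1 t, PySem.Set.add st.2 t)
          | none => st) (h, s)).2 ↔ t ∈ (ns.foldl (fun st nb =>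
          match index.get? nb with
          | some t =>
              if PySem.Set.contains done t || PySem.Set.contains st.2 t then st
              else (heapPush st.1 t, PySem.Set.add st.2 t)
          | none => st) (h, s)).1))
    ∧ (∀ t, t ∈ (ns.foldl (fun st nb =>
        match index.get? nb with
        | some t =>
            if PySem.Set.contains done t || PySem.Set.contains st.2 t then st
            else (heapPush st.1 t, PySem.Set.add st.2 t)
        | none => st) (h, s)).1 ↔
        (t ∈ h ∨ (PySem.Set.contains done t = false ∧ ∃ nb ∈ ns, index.get? nb = some t)))) := by
  intro ns
  induction ns with
  | nil =>
    intro h s hs hsync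
    refine ⟨hs, hsync, ?_⟩
    intro t
    simp
  | cons nb rest ih =>
    intro h s hs hsync
    simp only [List.foldl_cons]
    cases hg : index.get? nb with
    | none =>
      obtain ⟨i1, i2, i3⟩ := ih h s hs hsync
      refine ⟨i1, i2, ?_⟩
      intro t
      rw [i3]
      apply or_congr_right
      constructor
      · rintro ⟨hd, nb', hnb', hget⟩
        exact ⟨hd, nb', List.mem_cons_of_mem _ hnb', hget⟩
      · rintro ⟨hd, nb', hnb', hget⟩
        rcases List.mem_cons.mp hnb' with rfl | h'
        · rw [hg] at hget; cases hget
        · exact ⟨hd, nb', h', hget⟩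
    | some t0 =>
      dsimp only
      by_cases hc : (PySem.Set.contains done t0 || PySem.Set.contains s t0) = true
      · rw [if_pos hc]
        obtain ⟨i1, i2, i3⟩ := ih h s hs hsync
        refine ⟨i1, i2, ?_⟩
        intro t
        rw [i3]
        constructor
        · rintro (ht | ⟨hd, nb', hnb', hget⟩)
          · exact Or.inl ht
          · exact Or.inr ⟨hd, nb', List.mem_cons_of_mem _ hnb', hget⟩
        · rintro (ht | ⟨hd, nb', hnb', hget⟩)
          · exact Or.inl ht
          · rcases List.mem_cons.mp hnb' with rfl | h'
            · rw [hg] at hget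
              injection hget with he
              subst he
              rw [Bool.or_eq_true] at hc
              rcases hc with hdone | hsC
              · rw [hd] at hdone; cases hdone
              · exact Or.inl ((hsync _ hd).mp ((PySem.Set.contains_iff _ _).mp hsC))
            · exact Or.inr ⟨hd, nb', h', hget⟩
      · rw [if_neg hc]
        rw [Bool.or_eq_true, not_or] at hc
        have hdone : PySem.Set.contains done t0 = false := Bool.eq_false_iff.mpr hc.1
        have hsF : PySem.Set.contains s t0 = false := Bool.eq_false_iff.mpr hc.2
        have ht0h : t0 ∉ h := fun hm => (scontains_false.mp hsF) ((hsync t0 hdone).mpr hm)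
        have hs' : (heapPush h t0).Pairwise (· < ·) := heapPush_sorted t0 h hs ht0h
        have hsync' : ∀ t, PySem.Set.contains done t = false →
            (t ∈ PySem.Set.add s t0 ↔ t ∈ heapPush h t0) := by
          intro t hdt
          rw [PySem.Set.mem_add, heapPush_mem]
          have := hsync t hdt
          tauto
        obtain ⟨i1, i2, i3⟩ := ih (heapPush h t0) (PySem.Set.add s t0) hs' hsync'
        refine ⟨i1, i2, ?_⟩
        intro t
        rw [i3, heapPush_mem]
        constructor
        · rintro ((rfl | ht) | ⟨hd, nb', hnb', hget⟩)
          · exact Or.inr ⟨hdone, nb, List.mem_cons_self, hg⟩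
          · exact Or.inl ht
          · exact Or.inr ⟨hd, nb', List.mem_cons_of_mem _ hnb', hget⟩
        · rintro (ht | ⟨hd, nb', hnb', hget⟩)
          · exact Or.inl (Or.inr ht)
          · rcases List.mem_cons.mp hnb' with rfl | h'
            · rw [hg] at hget
              injection hget with he
              exact Or.inl (Or.inl he.symm)
            · exact Or.inr ⟨hd, nb', h', hget⟩

-- index dict: fold-insert lookup lemmas
lemma foldIns_get?_of_not_mem (c : Int × Int) :
    ∀ (ps : List (Int × (Int × Int))) (d : PySem.Dict (Int × Int) Int),
    c ∉ ps.map (·.2) →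
    (ps.foldl (fun d p => d.insert p.2 p.1) d).get? c = d.get? c := by
  intro ps
  induction ps with
  | nil => intro d _; rfl
  | cons p rest ih =>
    intro d hc
    simp only [List.map_cons, List.mem_cons, not_or] at hc
    rw [List.foldl_cons, ih _ hc.2, PySem.Dict.get?_insert, if_neg hc.1]

lemma foldIns_get?_of_mem (c : Int × Int) (t : Int) :
    ∀ (ps : List (Int × (Int × Int))) (d : PySem.Dict (Int × Int) Int),
    (t, c) ∈ ps → (ps.map (·.2)).Nodup →
    (ps.foldl (fun d p => d.insert p.2 p.1) d).get? c = some t := by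
  intro ps
  induction ps with
  | nil => intro d h _; cases h
  | cons p rest ih =>
    intro d hm hnd
    simp only [List.map_cons, List.nodup_cons] at hnd
    rcases List.mem_cons.mp hm with he | hm'
    · have hp2 : p.2 = c := by rw [← he]
      have hcn : c ∉ rest.map (·.2) := hp2 ▸ hnd.1
      rw [List.foldl_cons, foldIns_get?_of_not_mem c rest _ hcn,
        PySem.Dict.get?_insert, if_pos hp2.symm]
      rw [← he]
    · rw [List.foldl_cons]
      exact ih _ hm' hnd.2

lemma foldIns_get?_some (c : Int × Int) (t : Int) :
    ∀ (ps : List (Int × (Int × Int))) (d : PySem.Dict (Int × Int) Int),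
    (ps.foldl (fun d p => d.insert p.2 p.1) d).get? c = some t →
    (t, c) ∈ ps ∨ d.get? c = some t := by
  intro ps
  induction ps with
  | nil => intro d h; exact Or.inr h
  | cons p rest ih =>
    intro d h
    rw [List.foldl_cons] at h
    rcases ih _ h with hm | hg
    · exact Or.inl (List.mem_cons_of_mem _ hm)
    · rw [PySem.Dict.get?_insert] at hg
      by_cases hc : c = p.2
      · rw [if_pos hc] at hg
        obtain rfl : p.1 = t := by injection hg
        exact Or.inl (List.mem_cons.mpr (Or.inl (by rw [hc])))
      · rw [if_neg hc] at hg
        exact Or.inr hg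

lemma indexOf_get?_of_mem {v : List (Int × Int)} (hv : v.Nodup) {t : Int} {c : Int × Int}
    (h : (t, c) ∈ PySem.List.enumerate v) : (indexOfCells v).get? c = some t := by
  unfold indexOfCells
  exact foldIns_get?_of_mem c t _ _ h (by rw [PySem.List.map_snd_enumerate]; exact hv)

lemma indexOf_get?_some {v : List (Int × Int)} {t : Int} {c : Int × Int}
    (h : (indexOfCells v).get? c = some t) : (t, c) ∈ PySem.List.enumerate v := by
  unfold indexOfCells at h
  rcases foldIns_get?_some c t _ _ h with hm | hg
  · exact hm
  · rw [PySem.Dict.get?_empty] at hg; cases hg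

-- first element of a key-sorted pair list whose key is minimal among those satisfying Q
lemma find_decomp {Q : (Int × Int) → Bool} {k : Int} {c : Int × Int} :
    ∀ {ps : List (Int × (Int × Int))}, ps.Pairwise (·.1 < ·.1) →
    (k, c) ∈ ps → Q c = true → (∀ p ∈ ps, Q p.2 = true → k ≤ p.1) →
    ∃ pre post, ps = pre ++ (k, c) :: post ∧ (∀ p ∈ pre, Q p.2 = false) ∧
      (∀ p ∈ pre, p.1 < k) ∧ (∀ p ∈ post, k < p.1) := by
  intro ps
  induction ps with
  | nil => intro _ h; cases h
  | cons r rest ih =>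
    intro hpw hmem hQ hmin
    rw [List.pairwise_cons] at hpw
    rcases List.mem_cons.mp hmem with he | hm'
    · subst he
      exact ⟨[], rest, rfl, by simp, by simp, fun p hp => hpw.1 p hp⟩
    · have hrk : r.1 < k := hpw.1 (k, c) hm' 
      have hQr : Q r.2 = false := by
        cases hq : Q r.2
        · rfl
        · have := hmin r (List.mem_cons_self) hq
          omega
      obtain ⟨pre, post, heq, hp1, hp2, hp3⟩ :=
        ih hpw.2 hm' hQ (fun p hp hq => hmin p (List.mem_cons_of_mem _ hp) hq)
      refine ⟨r :: pre, post, by rw [heq]; simp, ?_, ?_, hp3⟩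
      · intro p hp
        rcases List.mem_cons.mp hp with rfl | hp'
        · exact hQr
        · exact hp1 p hp'
      · intro p hp
        rcases List.mem_cons.mp hp with rfl | hp'
        · exact hrk
        · exact hp2 p hp' 

lemma findIdx?_append_first {α : Type} (Q : α → Bool) (x : α) :
    ∀ (xs ys : List α), (∀ y ∈ xs, Q y = false) → Q x = true →
    (xs ++ x :: ys).findIdx? Q = some xs.length := by
  intro xs
  induction xs with
  | nil => intro ys _ hx; simp [List.findIdx?_cons, hx]
  | cons a l ih =>
    intro ys hall hx
    have ha : Q a = false := hall a (List.mem_cons_self)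
    simp only [List.cons_append, List.findIdx?_cons, ha, Bool.false_eq_true, if_false,
      ih ys (fun y hy => hall y (List.mem_cons_of_mem _ hy)) hx, Option.map_some,
      List.length_cons]

lemma getD_append_length {α : Type} [Inhabited α] (x d : α) :
    ∀ (xs ys : List α), (xs ++ x :: ys).getD xs.length d = x := by
  intro xs
  induction xs with
  | nil => intro ys; rfl
  | cons a l ih => intro ys; simp

lemma eraseIdx_append_length {α : Type} (x : α) :
    ∀ (xs ys : List α), (xs ++ x :: ys).eraseIdx xs.length = xs ++ ys := by
  intro xs
  induction xs with
  | nil => intro ys; rfl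
  | cons a l ih => intro ys; simpa using ih ys

-- remP basics
lemma remP_mem {v : List (Int × Int)} {done : PySem.Set Int} {p : Int × (Int × Int)} :
    p ∈ remP v done ↔ p ∈ PySem.List.enumerate v ∧ PySem.Set.contains done p.1 = false := by
  unfold remP
  rw [List.mem_filter]
  simp

lemma remP_pairwise (v : List (Int × Int)) (done : PySem.Set Int) :
    (remP v done).Pairwise (·.1 < ·.1) := by
  exact List.Pairwise.sublist List.filter_sublist (PySem.List.pairwise_lt_enumerate v 0)

lemma remP_add {v : List (Int × Int)} {done : PySem.Set Int} {k : Int} :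
    remP v (PySem.Set.add done k) = (remP v done).filter (fun p => !(p.1 == k)) := by
  unfold remP
  rw [List.filter_filter]
  apply List.filter_congr
  intro p _
  cases hc : PySem.Set.contains (PySem.Set.add done k) p.1
  · obtain ⟨h1, h2⟩ := scontains_add_false.mp hc
    simp [h2, scontains_false.mp h1]
  · have hm : p.1 ∈ PySem.Set.add done k := (PySem.Set.contains_iff _ _).mp hc
    rcases (PySem.Set.mem_add done k p.1).mp hm with hm' | rfl
    · simp [hm']
    · simp

-- done only grows along bfsLoopB
lemma bfs_done_mono (cells : List (Int × Int)) (index : PySem.Dict (Int × Int) Int) :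
    ∀ (fuel : Nat) (heap : List Int) (inheap done : PySem.Set Int) (obj : List (Int × Int)) (t : Int),
    PySem.Set.contains done t = true →
    PySem.Set.contains (bfsLoopB cells index fuel heap inheap done obj).2 t = true := by
  intro fuel
  induction fuel with
  | zero =>
    intro heap inheap done obj t h
    cases heap <;> exact h
  | succ fuel ih =>
    intro heap inheap done obj t h
    cases heap with
    | nil => exact h
    | cons k hs =>
      simp only [bfsLoopB]
      apply ih
      rw [PySem.Set.contains_iff, PySem.Set.mem_add]
      exact Or.inl ((PySem.Set.contains_iff _ _).mp h)

lemma adjO_snoc (obj : List (Int × Int)) (x c : Int × Int) :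
    adjO (obj ++ [x]) c = (adjO obj c || adjA x c) := by
  simp [adjO]

-- A's loop when no remaining cell is adjacent to obj: close the object and reseed
lemma inner_empty (v : List (Int × Int)) (done : PySem.Set Int) (obj : List (Int × Int))
    (objs : List (List (Int × Int))) (fa : Nat) (hobj : obj ≠ [])
    (hnoadj : ∀ p ∈ remP v done, adjO obj p.2 = false)
    (hfa : (remP v done).length ≤ fa) :
    splitLoopA fa ((remP v done).map (·.2)) obj objs
      = stepA ((remP v done).map (·.2)) (objs ++ [obj]) := by
  cases hL : (remP v done).map (·.2) with
  | nil =>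
    cases fa <;> · simp only [splitLoopA, stepA, if_neg hobj]
  | cons l0 rest =>
    have hlen : (remP v done).length = rest.length + 1 := by
      have := congrArg List.length hL
      simpa using this
    obtain ⟨fa', rfl⟩ : ∃ fa', fa = fa' + 1 := ⟨fa - 1, by omega⟩
    have hnone : (l0 :: rest).findIdx? (fun letter => obj.any fun item => adjA item letter)
        = none := by
      rw [List.findIdx?_eq_none_iff]
      intro x hx
      rw [← hL] at hx
      obtain ⟨p, hp, rfl⟩ := List.mem_map.mp hx
      exact hnoadj p hp
    simp only [splitLoopA, hnone, stepA]
    exact splitLoopA_stable fa' rest [l0] (objs ++ [obj]) (by omega)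

-- bfsLoopB on an empty heap returns immediately, for any fuel
lemma bfs_nil (cells : List (Int × Int)) (index : PySem.Dict (Int × Int) Int) (fuel : Nat)
    (inheap done : PySem.Set Int) (obj : List (Int × Int)) :
    bfsLoopB cells index fuel [] inheap done obj = (obj, done) := by
  cases fuel <;> rfl

-- the main simulation of one component growth
lemma inner_sim (v : List (Int × Int)) (hnd_v : v.Nodup) :
    ∀ (fb : Nat) (done : PySem.Set Int) (heap : List Int) (inheap : PySem.Set Int)
      (obj : List (Int × Int)) (objs : List (List (Int × Int))) (fa : Nat),
    obj ≠ [] →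
    heap.Pairwise (· < ·) →
    (∀ t ∈ heap, ∃ p ∈ PySem.List.enumerate v, p.1 = t) →
    (∀ p ∈ PySem.List.enumerate v,
      (p.1 ∈ heap ↔ (PySem.Set.contains done p.1 = false ∧ adjO obj p.2 = true))) →
    (∀ t, PySem.Set.contains done t = false → (t ∈ inheap ↔ t ∈ heap)) →
    (remP v done).length ≤ fa → (remP v done).length ≤ fb →
    splitLoopA fa ((remP v done).map (·.2)) obj objs
      = stepA ((remP v (bfsLoopB v (indexOfCells v) fb heap inheap done obj).2).map (·.2))
          (objs ++ [(bfsLoopB v (indexOfCells v) fb heap inheap done obj).1]) := by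
  intro fb
  induction fb with
  | zero =>
    intro done heap inheap obj objs fa hobj hsort hdom hinv hsync hfa hfb
    cases heap with
    | nil =>
      rw [bfs_nil]
      apply inner_empty v done obj objs fa hobj _ hfa
      intro p hp
      obtain ⟨hps, hnd⟩ := remP_mem.mp hp
      cases hq : adjO obj p.2
      · rfl
      · exact absurd ((hinv p hps).mpr ⟨hnd, hq⟩) (List.not_mem_nil)
    | cons k hs =>
      obtain ⟨p0, hp0, hp0k⟩ := hdom k (List.mem_cons_self)
      have hiff := (hinv p0 hp0).mp (by rw [hp0k]; exact List.mem_cons_self)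
      have hmem : p0 ∈ remP v done := remP_mem.mpr ⟨hp0, hiff.1⟩
      have : 0 < (remP v done).length := List.length_pos_of_mem hmem
      omega
  | succ fb ih =>
    intro done heap inheap obj objs fa hobj hsort hdom hinv hsync hfa hfb
    cases heap with
    | nil =>
      rw [bfs_nil]
      apply inner_empty v done obj objs fa hobj _ hfa
      intro p hp
      obtain ⟨hps, hnd⟩ := remP_mem.mp hp
      cases hq : adjO obj p.2
      · rfl
      · exact absurd ((hinv p hps).mpr ⟨hnd, hq⟩) (List.not_mem_nil)
    | cons k hs =>
      -- the pair of the minimal heap element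
      obtain ⟨p0, hp0a, hp0k⟩ := hdom k (List.mem_cons_self)
      have hp0 : (k, p0.2) ∈ PySem.List.enumerate v := by
        rw [← hp0k]
        exact hp0a
      set c := p0.2 with hcdef
      have hiff := (hinv (k, c) hp0).mp (List.mem_cons_self)
      have hmemrem : (k, c) ∈ remP v done := remP_mem.mpr ⟨hp0, hiff.1⟩
      have hsortP := List.pairwise_cons.mp hsort
      -- A picks exactly index k
      have hmin : ∀ p ∈ remP v done,
          (fun cc => adjO obj cc) p.2 = true → k ≤ p.1 := by
        intro p hp hq
        obtain ⟨hps, hnd⟩ := remP_mem.mp hp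
        have : p.1 ∈ k :: hs := (hinv p hps).mpr ⟨hnd, hq⟩
        rcases List.mem_cons.mp this with he | hm
        · omega
        · exact le_of_lt (hsortP.1 _ hm)
      obtain ⟨pre, post, heq, hpreQ, hprek, hpostk⟩ :=
        find_decomp (remP_pairwise v done) hmemrem hiff.2 hmin
      have hlet : (remP v done).map (·.2) = pre.map (·.2) ++ c :: post.map (·.2) := by
        rw [heq]; simp
      -- remaining cells after marking k done
      have hrem' : remP v (PySem.Set.add done k) = pre ++ post := by
        rw [remP_add, heq, List.filter_append]
        have h1 : pre.filter (fun p => !(p.1 == k)) = pre :=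
          List.filter_eq_self.mpr (fun p hp => by
            have := hprek p hp; simp; omega)
        have h2 : ((k, c) :: post).filter (fun p => !(p.1 == k)) = post := by
          rw [List.filter_cons]
          have h3 : post.filter (fun p => !(p.1 == k)) = post :=
            List.filter_eq_self.mpr (fun p hp => by
              have := hpostk p hp; simp; omega)
          simp [h3]
        rw [h1, h2]
      have hlenrem : (remP v done).length = pre.length + post.length + 1 := by
        rw [heq]; simp; omega
      -- fa is positive
      obtain ⟨fa', rfl⟩ : ∃ fa', fa = fa' + 1 := ⟨fa - 1, by omega⟩
      -- cell at k
      obtain ⟨kn, hkn, hke⟩ := (PySem.List.mem_enumerate_iff _ _ _).mp hp0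
      have hkval : k = (kn : Int) := by
        have := congrArg Prod.fst hke
        simpa using this
      have hcval : c = v[kn] := by
        have := congrArg Prod.snd hke
        simpa using this
      have hcB : PySem.List.pyGetD v k ((0 : Int), (0 : Int)) = c := by
        rw [PySem.List.pyGetD_eq_getElem v _ (by omega) (by rw [hkval]; exact_mod_cast hkn)]
        have hkt : k.toNat = kn := by rw [hkval]; exact Int.toNat_natCast kn
        simp only [hkt]
        exact hcval.symm
      -- A's step
      have hA : splitLoopA (fa' + 1) ((remP v done).map (·.2)) obj objs
          = splitLoopA fa' ((remP v (PySem.Set.add done k)).map (·.2)) (obj ++ [c]) objs := by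
        rw [hlet]
        obtain ⟨l0, rest, hL⟩ :
            ∃ l0 rest, pre.map (·.2) ++ c :: post.map (·.2) = l0 :: rest := by
          cases hPm : pre.map (·.2) with
          | nil => exact ⟨c, post.map (·.2), rfl⟩
          | cons a b => exact ⟨a, b ++ c :: post.map (·.2), by simp⟩
        have hfind : (pre.map (·.2) ++ c :: post.map (·.2)).findIdx?
            (fun letter => obj.any fun item => adjA item letter)
            = some (pre.map (·.2)).length := by
          apply findIdx?_append_first
          · intro y hy
            obtain ⟨p, hp, rfl⟩ := List.mem_map.mp hy
            exact hpreQ p hp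
          · exact hiff.2
        have hgetD : (pre.map (·.2) ++ c :: post.map (·.2)).getD (pre.map (·.2)).length l0
            = c := getD_append_length c l0 _ _
        have herase : (pre.map (·.2) ++ c :: post.map (·.2)).eraseIdx (pre.map (·.2)).length
            = pre.map (·.2) ++ post.map (·.2) := eraseIdx_append_length c _ _
        rw [hL] at hfind hgetD herase
        rw [hL]
        simp only [splitLoopA, hfind]
        rw [hgetD, herase, hrem']
        simp
      rw [hA]
      -- B's step
      have hstep : bfsLoopB v (indexOfCells v) (fb + 1) (k :: hs) inheap done obj
          = bfsLoopB v (indexOfCells v) fb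
              (pushNbrs (indexOfCells v) (PySem.Set.add done k)
                (PySem.List.pyGetD v k ((0:Int), (0:Int))) hs inheap).1
              (pushNbrs (indexOfCells v) (PySem.Set.add done k)
                (PySem.List.pyGetD v k ((0:Int), (0:Int))) hs inheap).2
              (PySem.Set.add done k) (obj ++ [PySem.List.pyGetD v k ((0:Int), (0:Int))]) := rfl
      rw [hstep, hcB]
      -- pushNbrs characterization
      have hsync2 : ∀ t, PySem.Set.contains (PySem.Set.add done k) t = false →
          (t ∈ inheap ↔ t ∈ hs) := by
        intro t ht
        obtain ⟨h1, h2⟩ := scontains_add_false.mp ht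
        rw [hsync t h1]
        constructor
        · intro hm
          rcases List.mem_cons.mp hm with rfl | hm'
          · exact absurd rfl h2
          · exact hm'
        · exact List.mem_cons_of_mem _
      obtain ⟨j1, j2, j3⟩ := pushFold_spec (indexOfCells v) (PySem.Set.add done k)
        (nbrsB c) hs inheap hsortP.2 hsync2
      have hkn_hs : k ∉ hs := fun hm => absurd (hsortP.1 k hm) (by omega)
      -- invariants for the recursive call
      have hdom' : ∀ t ∈ (pushNbrs (indexOfCells v) (PySem.Set.add done k) c hs inheap).1,
          ∃ p ∈ PySem.List.enumerate v, p.1 = t := by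
        simp only [pushNbrs]
        intro t ht
        rcases (j3 t).mp ht with hm | ⟨_, nb, _, hget⟩
        · exact hdom t (List.mem_cons_of_mem _ hm)
        · exact ⟨(t, nb), indexOf_get?_some hget, rfl⟩
      have hinv' : ∀ p ∈ PySem.List.enumerate v,
          (p.1 ∈ (pushNbrs (indexOfCells v) (PySem.Set.add done k) c hs inheap).1 ↔
            (PySem.Set.contains (PySem.Set.add done k) p.1 = false ∧
              adjO (obj ++ [c]) p.2 = true)) := by
        simp only [pushNbrs]
        intro p hp
        rw [j3, adjO_snoc, Bool.or_eq_true]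
        constructor
        · rintro (ht | ⟨hdf, nb, hnb, hget⟩)
          · have hne : p.1 ≠ k := fun he => hkn_hs (he ▸ ht)
            have hold := (hinv p hp).mp (List.mem_cons_of_mem _ ht)
            exact ⟨scontains_add_false.mpr ⟨hold.1, hne⟩, Or.inl hold.2⟩
          · have hpm : (p.1, nb) ∈ PySem.List.enumerate v := indexOf_get?_some hget
            have hpe : p = (p.1, nb) :=
              keys_unique (PySem.List.pairwise_lt_enumerate v 0) hp hpm rfl
            have hnbp : nb = p.2 := by rw [hpe]
            exact ⟨hdf, Or.inr ((mem_nbrs_iff c p.2).mp (hnbp ▸ hnb))⟩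
        · rintro ⟨hdf, hadj⟩
          obtain ⟨hnd, hne⟩ := scontains_add_false.mp hdf
          rcases hadj with hadj | hadj
          · have : p.1 ∈ k :: hs := (hinv p hp).mpr ⟨hnd, hadj⟩
            rcases List.mem_cons.mp this with he | hm
            · exact absurd he hne
            · exact Or.inl hm
          · refine Or.inr ⟨hdf, p.2, (mem_nbrs_iff c p.2).mpr hadj, ?_⟩
            exact indexOf_get?_of_mem hnd_v hp
      -- recurse
      have := ih (PySem.Set.add done k)
        (pushNbrs (indexOfCells v) (PySem.Set.add done k) c hs inheap).1
        (pushNbrs (indexOfCells v) (PySem.Set.add done k) c hs inheap).2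
        (obj ++ [c]) objs fa' (by simp) j1 hdom' hinv' j2
        (by rw [hrem']; simp at hlenrem ⊢; omega)
        (by rw [hrem']; simp at hlenrem ⊢; omega)
      exact this

-- advanceB: moves to the first not-done position (or n), marking everything passed as done
lemma advance_spec (n : Int) (done : PySem.Set Int) :
    ∀ (fuel : Nat) (start : Int), (n - start).toNat ≤ fuel →
    start ≤ advanceB n done fuel start ∧
    (∀ t, start ≤ t → t < advanceB n done fuel start → PySem.Set.contains done t = true) ∧
    (advanceB n done fuel start < n → PySem.Set.contains done (advanceB n done fuel start) = false) := by
  intro fuel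
  induction fuel with
  | zero =>
    intro start h
    refine ⟨le_refl _, by intro t h1 h2; simp only [advanceB] at h2; omega, ?_⟩
    intro hlt
    simp only [advanceB] at hlt ⊢
    omega
  | succ fuel ih =>
    intro start h
    simp only [advanceB]
    split
    · rename_i hcond
      rw [Bool.and_eq_true, decide_eq_true_eq] at hcond
      obtain ⟨ih1, ih2, ih3⟩ := ih (start + 1) (by omega)
      refine ⟨by omega, ?_, ih3⟩
      intro t h1 h2
      rcases eq_or_lt_of_le h1 with rfl | h1'
      · exact hcond.2
      · exact ih2 t (by omega) h2
    · rename_i hcond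
      rw [Bool.and_eq_true, not_and_or] at hcond
      refine ⟨le_refl _, by intro t h1 h2; omega, ?_⟩
      intro hlt
      rcases hcond with hc | hc
      · exact absurd (decide_eq_true_eq.mpr hlt) hc
      · exact Bool.eq_false_iff.mpr hc

-- the outer loop simulation
lemma outer_sim (v : List (Int × Int)) (hnd_v : v.Nodup) :
    ∀ (fo : Nat) (done : PySem.Set Int) (start : Int) (objs : List (List (Int × Int))),
    0 ≤ start →
    (∀ p ∈ PySem.List.enumerate v, p.1 < start → PySem.Set.contains done p.1 = true) →
    (start < (v.length : Int) → PySem.Set.contains done start = false) →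
    (remP v done).length ≤ fo →
    stepA ((remP v done).map (·.2)) objs
      = outerLoopB v (indexOfCells v) fo start done objs := by
  intro fo
  induction fo with
  | zero =>
    intro done start objs h0 hlt hst hlen
    by_cases hs : start < (v.length : Int)
    · have hsn : start.toNat < v.length := by omega
      have hsmem : (start, v[start.toNat]) ∈ PySem.List.enumerate v := by
        rw [PySem.List.mem_enumerate_iff]
        refine ⟨start.toNat, hsn, ?_⟩
        have : ((0 : Int) + (start.toNat : Int)) = start := by omega
        rw [this]
      have hsrem : (start, v[start.toNat]) ∈ remP v done :=
        remP_mem.mpr ⟨hsmem, hst hs⟩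
      have : 0 < (remP v done).length := List.length_pos_of_mem hsrem
      omega
    · have hempty : remP v done = [] := by
        unfold remP
        rw [List.filter_eq_nil_iff]
        intro p hp
        obtain ⟨kk, hkk, hpe⟩ := (PySem.List.mem_enumerate_iff _ _ _).mp hp
        have hp1 : p.1 < start := by
          have := congrArg Prod.fst hpe
          simp at this
          omega
        have hd := hlt p hp hp1
        simp [(PySem.Set.contains_iff _ _).mp hd]
      rw [hempty]
      rfl
  | succ fo ih =>
    intro done start objs h0 hlt hst hlen
    by_cases hs : start < (v.length : Int)
    · -- the seed cell
      have hsn : start.toNat < v.length := by omega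
      have hsmem : (start, v[start.toNat]) ∈ PySem.List.enumerate v := by
        rw [PySem.List.mem_enumerate_iff]
        refine ⟨start.toNat, hsn, ?_⟩
        have : ((0 : Int) + (start.toNat : Int)) = start := by omega
        rw [this]
      have hdone_start := hst hs
      have hsrem : (start, v[start.toNat]) ∈ remP v done :=
        remP_mem.mpr ⟨hsmem, hdone_start⟩
      have hmin : ∀ p ∈ remP v done, (fun (_ : Int × Int) => true) p.2 = true → start ≤ p.1 := by
        intro p hp _
        obtain ⟨hps, hnd⟩ := remP_mem.mp hp
        by_contra hcon
        have hcon2 : p.1 < start := by omega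
        rw [hlt p hps hcon2] at hnd
        cases hnd
      obtain ⟨pre, post, heq, hpreQ, hprek, hpostk⟩ :=
        find_decomp (Q := fun _ => true) (remP_pairwise v done) hsrem rfl hmin
      have hpre : pre = [] := by
        cases pre with
        | nil => rfl
        | cons a b => exact absurd (hpreQ a List.mem_cons_self) (by simp)
      subst hpre
      rw [List.nil_append] at heq
      -- after marking start done
      have hrem1 : remP v (PySem.Set.add done start) = post := by
        rw [remP_add, heq, List.filter_cons]
        have h3 : post.filter (fun p => !(p.1 == start)) = post :=
          List.filter_eq_self.mpr (fun p hp => by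
            have := hpostk p hp; simp; omega)
        simp [h3]
      obtain ⟨m, hm⟩ : ∃ m, v.length = m + 1 := ⟨v.length - 1, by omega⟩
      have hcB : PySem.List.pyGetD v start ((0 : Int), (0 : Int)) = v[start.toNat] := by
        rw [PySem.List.pyGetD_eq_getElem v _ h0 hs]
      -- B's first bfs iteration from the seed
      have hstepB : bfsLoopB v (indexOfCells v) (m + 1) [start]
            (PySem.Set.ofList [start]) done []
          = bfsLoopB v (indexOfCells v) m
              (pushNbrs (indexOfCells v) (PySem.Set.add done start)
                (PySem.List.pyGetD v start ((0:Int), (0:Int))) [] (PySem.Set.ofList [start])).1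
              (pushNbrs (indexOfCells v) (PySem.Set.add done start)
                (PySem.List.pyGetD v start ((0:Int), (0:Int))) [] (PySem.Set.ofList [start])).2
              (PySem.Set.add done start)
              ([] ++ [PySem.List.pyGetD v start ((0:Int), (0:Int))]) := rfl
      have hsync2 : ∀ t, PySem.Set.contains (PySem.Set.add done start) t = false →
          (t ∈ PySem.Set.ofList [start] ↔ t ∈ ([] : List Int)) := by
        intro t ht
        obtain ⟨h1, h2⟩ := scontains_add_false.mp ht
        constructor
        · intro hm'
          rw [PySem.Set.mem_ofList] at hm'
          simp at hm'
          exact absurd hm' h2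
        · intro hm'
          cases hm'
      obtain ⟨j1, j2, j3⟩ := pushFold_spec (indexOfCells v) (PySem.Set.add done start)
        (nbrsB v[start.toNat]) [] (PySem.Set.ofList [start]) List.Pairwise.nil hsync2
      have hdom' : ∀ t ∈ (pushNbrs (indexOfCells v) (PySem.Set.add done start)
            v[start.toNat] [] (PySem.Set.ofList [start])).1,
          ∃ p ∈ PySem.List.enumerate v, p.1 = t := by
        simp only [pushNbrs]
        intro t ht
        rcases (j3 t).mp ht with hm' | ⟨_, nb, _, hget⟩
        · cases hm'
        · exact ⟨(t, nb), indexOf_get?_some hget, rfl⟩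
      have hinv' : ∀ p ∈ PySem.List.enumerate v,
          (p.1 ∈ (pushNbrs (indexOfCells v) (PySem.Set.add done start)
              v[start.toNat] [] (PySem.Set.ofList [start])).1 ↔
            (PySem.Set.contains (PySem.Set.add done start) p.1 = false ∧
              adjO [v[start.toNat]] p.2 = true)) := by
        simp only [pushNbrs]
        intro p hp
        rw [j3]
        constructor
        · rintro (ht | ⟨hdf, nb, hnb, hget⟩)
          · cases ht
          · have hpm : (p.1, nb) ∈ PySem.List.enumerate v := indexOf_get?_some hget
            have hpe : p = (p.1, nb) :=
              keys_unique (PySem.List.pairwise_lt_enumerate v 0) hp hpm rfl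
            have hnbp : nb = p.2 := by rw [hpe]
            refine ⟨hdf, ?_⟩
            simp [adjO]
            exact (mem_nbrs_iff _ p.2).mp (hnbp ▸ hnb)
        · rintro ⟨hdf, hadj⟩
          simp [adjO] at hadj
          exact Or.inr ⟨hdf, p.2, (mem_nbrs_iff _ p.2).mpr hadj, indexOf_get?_of_mem hnd_v hp⟩
      have hlenpost : (remP v done).length = post.length + 1 := by
        rw [heq]; simp
      have hpostm : post.length ≤ m := by
        have : (remP v done).length ≤ (PySem.List.enumerate v).length :=
          List.Sublist.length_le (List.filter_sublist)
        rw [PySem.List.length_enumerate, hm] at this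
        omega
      have hinner := inner_sim v hnd_v m (PySem.Set.add done start)
        (pushNbrs (indexOfCells v) (PySem.Set.add done start)
          v[start.toNat] [] (PySem.Set.ofList [start])).1
        (pushNbrs (indexOfCells v) (PySem.Set.add done start)
          v[start.toNat] [] (PySem.Set.ofList [start])).2
        [v[start.toNat]] objs post.length (by simp) j1 hdom' hinv' j2
        (by rw [hrem1]) (by rw [hrem1]; exact hpostm)
      -- name B's inner result
      set r := bfsLoopB v (indexOfCells v) m
        (pushNbrs (indexOfCells v) (PySem.Set.add done start)
          v[start.toNat] [] (PySem.Set.ofList [start])).1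
        (pushNbrs (indexOfCells v) (PySem.Set.add done start)
          v[start.toNat] [] (PySem.Set.ofList [start])).2
        (PySem.Set.add done start) [v[start.toNat]] with hr
      -- done grows through the bfs run
      have hmono : ∀ t, PySem.Set.contains done t = true →
          PySem.Set.contains r.2 t = true := by
        intro t ht
        rw [hr]
        apply bfs_done_mono
        rw [PySem.Set.contains_iff, PySem.Set.mem_add]
        exact Or.inl ((PySem.Set.contains_iff _ _).mp ht)
      have hmono1 : ∀ t, PySem.Set.contains (PySem.Set.add done start) t = true →
          PySem.Set.contains r.2 t = true := by
        intro t ht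
        rw [hr]
        exact bfs_done_mono _ _ _ _ _ _ _ _ ht
      have hrsub : (remP v r.2).length ≤ post.length := by
        rw [← hrem1]
        apply List.Sublist.length_le
        apply List.monotone_filter_right
        intro p hp
        rw [Bool.not_eq_eq_eq_not, Bool.not_true] at hp ⊢
        cases hc2 : PySem.Set.contains (PySem.Set.add done start) p.1
        · rfl
        · rw [hmono1 p.1 hc2] at hp; cases hp
      -- advance properties
      obtain ⟨a1, a2, a3⟩ := advance_spec (v.length : Int) r.2 v.length start (by omega)
      -- apply the outer induction hypothesis after the component
      have houter := ih r.2 (advanceB (v.length : Int) r.2 v.length start)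
        (objs ++ [r.1]) (by omega) ?_ a3 (by omega)
      · -- assemble
        rw [heq]
        have hstep : stepA ((((start, v[start.toNat]) :: post)).map (·.2)) objs
            = splitLoopA (post.map (·.2)).length (post.map (·.2)) [v[start.toNat]] objs := by
          simp only [stepA, List.map_cons]
        rw [hstep]
        simp only [outerLoopB]
        rw [if_pos hs, hm, hstepB, hcB]
        simp only [List.nil_append]
        rw [← hr]
        rw [hm] at houter
        rw [← houter]
        rw [← hinner]
        rw [hrem1]
        congr 1
        simp
      · -- all indices below the new start are done
        intro p hp hplt
        by_cases hps : p.1 < start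
        · exact hmono p.1 (hlt p hp hps)
        · exact a2 p.1 (by omega) hplt
    · have hempty : remP v done = [] := by
        unfold remP
        rw [List.filter_eq_nil_iff]
        intro p hp
        obtain ⟨kk, hkk, hpe⟩ := (PySem.List.mem_enumerate_iff _ _ _).mp hp
        have hp1 : p.1 < start := by
          have := congrArg Prod.fst hpe
          simp at this
          omega
        have hd := hlt p hp hp1
        simp [(PySem.Set.contains_iff _ _).mp hd]
      rw [hempty]
      simp only [outerLoopB]
      rw [if_neg hs]
      rfl

-- per-group equivalence
lemma group_eq (v : List (Int × Int)) (hnd_v : v.Nodup) (objs : List (List (Int × Int))) :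
    objs ++ splitObjectsA v = outerLoopB v (indexOfCells v) v.length 0 PySem.Set.empty objs := by
  have hcempty : ∀ t : Int, PySem.Set.contains PySem.Set.empty t = false := by
    intro t
    rfl
  have hrem0 : remP v PySem.Set.empty = PySem.List.enumerate v := by
    unfold remP
    apply List.filter_eq_self.mpr
    intro p _
    rw [hcempty]
    rfl
  have h := outer_sim v hnd_v v.length PySem.Set.empty 0 objs le_rfl
    (by
      intro p hp hlt
      obtain ⟨kk, hkk, hpe⟩ := (PySem.List.mem_enumerate_iff _ _ _).mp hp
      have : p.1 = (kk : Int) := by rw [hpe]; simp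
      omega)
    (fun _ => hcempty 0)
    (by rw [hrem0, PySem.List.length_enumerate])
  rw [← h, hrem0, PySem.List.map_snd_enumerate]
  cases v with
  | nil => simp [splitObjectsA, stepA]
  | cons l0 rest =>
    simp only [splitObjectsA, stepA]
    exact (splitLoopA_acc rest.length rest [l0] objs).symm

-- ===== nodup of the dict's value lists =====

def cellLt (p q : Int × Int) : Prop := p.1 < q.1 ∨ (p.1 = q.1 ∧ p.2 < q.2)

def GoodD (d : PySem.Dict Char (List (Int × Int))) (b : Int × Int) : Prop :=
  ∀ l ∈ d.values, l.Pairwise cellLt ∧ ∀ x ∈ l, cellLt x b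

lemma mem_values_of_get? {κ ν : Type} [BEq κ] (d : PySem.Dict κ ν) (k : κ) (l : ν)
    (h : d.get? k = some l) : l ∈ d.values := by
  obtain ⟨items⟩ := d
  induction items with
  | nil => cases h
  | cons p rest ih =>
    rw [show p = (p.1, p.2) from rfl, PySem.Dict.get?_mk_cons] at h
    by_cases hc : (p.1 == k) = true
    · rw [if_pos hc] at h
      injection h with he
      simp [PySem.Dict.values, ← he]
    · rw [if_neg hc] at h
      have := ih h
      simp [PySem.Dict.values] at this ⊢
      exact Or.inr this

lemma mem_values_insert {κ ν : Type} [BEq κ] [LawfulBEq κ] (d : PySem.Dict κ ν) (k : κ) (v l : ν)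
    (h : l ∈ (d.insert k v).values) : l = v ∨ l ∈ d.values := by
  have hv : (d.insert k v).values = ((d.insert k v).items).map (·.2) := by
    simp [PySem.Dict.values]
  rw [hv, PySem.Dict.items_insert] at h
  by_cases hc : d.contains k = true
  · rw [if_pos hc, List.map_map] at h
    obtain ⟨p, hp, hpe⟩ := List.mem_map.mp h
    by_cases hpk : (p.1 == k) = true
    · left
      rw [← hpe]
      simp [Function.comp, hpk]
    · right
      rw [← hpe]
      simp only [Function.comp]
      rw [if_neg hpk]
      have hvv : d.values = d.items.map (·.2) := by simp [PySem.Dict.values]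
      rw [hvv]
      exact List.mem_map_of_mem hp
  · rw [if_neg hc, List.map_append] at h
    rcases List.mem_append.mp h with hm | hm
    · right
      simpa [PySem.Dict.values] using hm
    · left
      simpa using hm

lemma cellLt_wk {x : Int × Int} {i j i' j' : Int} (h : cellLt x (i, j))
    (h2 : i < i' ∨ (i = i' ∧ j ≤ j')) : cellLt x (i', j') := by
  obtain ⟨a, b⟩ := x
  unfold cellLt at h ⊢
  simp at h ⊢
  omega

lemma GoodD_wk {d : PySem.Dict Char (List (Int × Int))} {b b' : Int × Int}
    (h : GoodD d b) (hw : ∀ x, cellLt x b → cellLt x b') : GoodD d b' :=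
  fun l hl => ⟨(h l hl).1, fun x hx => hw x ((h l hl).2 x hx)⟩

lemma good_nodup (d : PySem.Dict Char (List (Int × Int))) (b : Int × Int)
    (h : GoodD d b) : ∀ l ∈ d.values, l.Nodup := by
  intro l hl
  apply List.Pairwise.imp _ (h l hl).1
  intro x y hxy he
  subst he
  unfold cellLt at hxy
  omega

lemma good_step (i j : Int) (ch : Char) (d : PySem.Dict Char (List (Int × Int)))
    (h : GoodD d (i, j)) :
    GoodD ((if d.contains ch then d else d.insert ch ([] : List (Int × Int))).insert ch
        ((if d.contains ch then d else d.insert ch ([] : List (Int × Int))).getD ch []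
          ++ [(i, j)])) (i, j + 1) := by
  have hgetD : (if d.contains ch then d else d.insert ch ([] : List (Int × Int))).getD ch []
      = d.getD ch [] := by
    by_cases hc : d.contains ch = true
    · rw [if_pos hc]
    · rw [if_neg hc, PySem.Dict.getD_insert_self,
        PySem.Dict.getD_of_not_contains d [] (by simpa using hc)]
  have hd1 : GoodD (if d.contains ch then d else d.insert ch ([] : List (Int × Int))) (i, j) := by
    by_cases hc : d.contains ch = true
    · rw [if_pos hc]; exact h
    · rw [if_neg hc]
      intro l hl
      rcases mem_values_insert _ _ _ _ hl with rfl | hl2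
      · exact ⟨List.Pairwise.nil, by simp⟩
      · exact h l hl2
  have hold : (d.getD ch []).Pairwise cellLt ∧ ∀ x ∈ d.getD ch [], cellLt x (i, j) := by
    rw [PySem.Dict.getD_eq_get?_getD]
    cases hg : d.get? ch with
    | none => exact ⟨List.Pairwise.nil, by simp⟩
    | some l0 =>
      have := h l0 (mem_values_of_get? d ch l0 hg)
      simpa using this
  intro l hl
  rcases mem_values_insert _ _ _ _ hl with rfl | hl2
  · rw [hgetD]
    constructor
    · rw [List.pairwise_append]
      refine ⟨hold.1, by simp, ?_⟩
      intro x hx y hy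
      rw [List.mem_singleton.mp hy]
      exact hold.2 x hx
    · intro x hx
      rcases List.mem_append.mp hx with hx2 | hx2
      · exact cellLt_wk (hold.2 x hx2) (Or.inr ⟨rfl, by omega⟩)
      · rw [List.mem_singleton.mp hx2]
        unfold cellLt
        right
        exact ⟨rfl, by omega⟩
  · exact GoodD_wk hd1 (fun x hx => cellLt_wk hx (Or.inr ⟨rfl, by omega⟩)) l hl2

lemma good_row (i : Int) : ∀ (cs : List Char) (j : Int) (d : PySem.Dict Char (List (Int × Int))),
    GoodD d (i, j) →
    GoodD ((PySem.List.enumerate cs j).foldl (fun d q =>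
        let d1 := if d.contains q.2 then d else d.insert q.2 ([] : List (Int × Int))
        d1.insert q.2 (d1.getD q.2 [] ++ [(i, q.1)])) d) (i, j + (cs.length : Int)) := by
  intro cs
  induction cs with
  | nil =>
    intro j d h
    simpa [PySem.List.enumerate] using h
  | cons ch rest ih =>
    intro j d h
    rw [PySem.List.enumerate_cons, List.foldl_cons]
    have hcast : (j + 1) + (rest.length : Int) = j + ((rest.length : Int) + 1) := by ring
    have := ih (j + 1) _ (good_step i j ch d h)
    rw [hcast] at this
    simpa using this

lemma good_all : ∀ (rows : List String) (i : Int) (d : PySem.Dict Char (List (Int × Int))),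
    GoodD d (i, 0) →
    GoodD ((PySem.List.enumerate rows i).foldl (fun d p =>
      (PySem.List.enumerate p.2.toList).foldl (fun d q =>
        let d1 := if d.contains q.2 then d else d.insert q.2 ([] : List (Int × Int))
        d1.insert q.2 (d1.getD q.2 [] ++ [(p.1, q.1)])) d) d)
      ((i + (rows.length : Int)), 0) := by
  intro rows
  induction rows with
  | nil =>
    intro i d h
    simpa [PySem.List.enumerate] using h
  | cons r rest ih =>
    intro i d h
    rw [PySem.List.enumerate_cons, List.foldl_cons]
    have hrow := good_row i r.toList 0 d h
    have hrow' : GoodD ((PySem.List.enumerate r.toList 0).foldl (fun d q =>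
        let d1 := if d.contains q.2 then d else d.insert q.2 ([] : List (Int × Int))
        d1.insert q.2 (d1.getD q.2 [] ++ [(i, q.1)])) d) (i + 1, 0) := by
      exact GoodD_wk hrow (fun x hx => cellLt_wk hx (Or.inl (by omega)))
    have := ih (i + 1) _ hrow'
    have hcast : (i + 1) + (rest.length : Int) = i + ((rest.length : Int) + 1) := by ring
    rw [hcast] at this
    simpa using this

lemma good_build (data : List String) :
    GoodD ((PySem.List.enumerate data).foldl (fun d p =>
      (PySem.List.enumerate p.2.toList).foldl (fun d q =>
        let d1 := if d.contains q.2 then d else d.insert q.2 ([] : List (Int × Int))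
        d1.insert q.2 (d1.getD q.2 [] ++ [(p.1, q.1)])) d)
      PySem.Dict.empty) ((data.length : Int), 0) := by
  have hempty : GoodD PySem.Dict.empty (0, 0) := by
    intro l hl
    simp [PySem.Dict.values, PySem.Dict.empty] at hl
  have := good_all data 0 PySem.Dict.empty hempty
  simpa using this

-- A's and B's dict builds are the same dict
lemma setdefault_eq_ite (d : PySem.Dict Char (List (Int × Int))) (k : Char) :
    d.setdefault k [] = if d.contains k then d else d.insert k [] := by
  by_cases h : d.contains k = true
  · rw [if_pos h, PySem.Dict.setdefault_of_contains (h := h)]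
  · rw [if_neg h, PySem.Dict.setdefault_of_not_contains (h := by simpa using h)]

-- the two per-value loops agree over any list of nodup value lists
lemma foldAB (vs : List (List (Int × Int))) (h : ∀ l ∈ vs, l.Nodup) :
    ∀ objs, vs.foldl (fun objs v => objs ++ splitObjectsA v) objs
      = vs.foldl (fun objs cells =>
          outerLoopB cells (indexOfCells cells) cells.length 0 PySem.Set.empty objs) objs := by
  induction vs with
  | nil => intro objs; rfl
  | cons v vs ih =>
    intro objs
    rw [List.foldl_cons, List.foldl_cons,
      ← group_eq v (h v List.mem_cons_self) objs]
    exact ih (fun l hl => h l (List.mem_cons_of_mem _ hl)) _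

-- ===== VERDICT (by name: the statement is the Claim_ definition above) =====
theorem data2objects_spec : Claim_equal_data2objects := by
  intro data _
  unfold Spec_data2objects data2objects data2objects_alt
  simp only [setdefault_eq_ite]
  exact foldAB _ (good_nodup _ _ (good_build data)) []
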